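-- pv_equiv track=rewrite | github.com/siemens/OOASP | singleshot_bench/autorun.py | generate_ids
-- ===== SOURCE A (Python) =====
-- from typing import List
--
-- ELEMENT_TYPES = 4
--
-- ELEMENT_NAMES = 'ABCD'
--
-- def generate_ids(n: int) -> List:
--     """
--     Generates combinations of element definitions
--     with suitable IDs.
--     """
--
--     ids = [id+1 for id in range(ELEMENT_TYPES*n)]
--     assigned = [ids[i*n:i*n+n] for i in range(ELEMENT_TYPES)]
--     terms = []
--
--     for letter, category in enumerate(assigned):
--         for id in category:
--             terms.append(f"ooasp_isa(element{ELEMENT_NAMES[letter]},{id}).")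
--
--     return terms
-- ===== SOURCE B (Python) =====
-- from typing import List
--
-- ELEMENT_TYPES = 4
--
-- ELEMENT_NAMES = 'ABCD'
--
-- def generate_ids(n: int) -> List:
--     """
--     Generates combinations of element definitions
--     with suitable IDs (single flat pass).
--     """
--     terms = []
--     for i in range(ELEMENT_TYPES * n):
--         terms.append(f"ooasp_isa(element{ELEMENT_NAMES[i // n]},{i + 1}).")
--     return terms
-- ===== Notes on version B (the rewrite author's own statement) =====
-- stated objective: simpler
-- what changed: Replaces A's precomputed id table, slicing into four category lists and nested enumerate loop by a single flat pass over range(4*n) that derives the letter with integer division i//n and the id as i+1.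
import Mathlib
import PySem

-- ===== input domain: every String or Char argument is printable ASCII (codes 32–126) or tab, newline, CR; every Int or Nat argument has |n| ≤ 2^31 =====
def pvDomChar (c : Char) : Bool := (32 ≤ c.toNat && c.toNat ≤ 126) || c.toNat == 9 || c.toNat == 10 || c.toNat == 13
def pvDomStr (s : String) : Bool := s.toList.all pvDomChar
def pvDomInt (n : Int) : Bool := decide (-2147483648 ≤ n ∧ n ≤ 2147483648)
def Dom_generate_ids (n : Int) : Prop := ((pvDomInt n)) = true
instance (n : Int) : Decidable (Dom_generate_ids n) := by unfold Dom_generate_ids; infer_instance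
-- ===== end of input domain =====

-- B replaces A's id table + slicing into categories + nested loop by one flat pass using i // n; objective: simpler.

-- the f-string f"ooasp_isa(element{ELEMENT_NAMES[letter]},{id})." shared verbatim by both Pythons
def pvFString (letter id : Int) : String :=
  "ooasp_isa(element" ++ (((PySem.Str.pyGet? "ABCD" letter).map String.singleton).getD "") ++
    "," ++ PySem.Int.toStr id ++ ")."

-- ===== PORT A =====
def generate_ids (n : Int) : List String :=
  let ids := (PySem.List.pyRange 0 (4*n) 1).map (· + 1)
  let assigned := (PySem.List.pyRange 0 4 1).map
    (fun i => PySem.List.slice ids (some (i*n)) (some (i*n+n)))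
  (PySem.List.enumerate assigned).foldl (fun terms lc =>
    lc.2.foldl (fun terms id => terms ++ [pvFString lc.1 id]) terms) []

-- ===== PORT B =====
def generate_ids_alt (n : Int) : List String :=
  (PySem.List.pyRange 0 (4*n) 1).foldl
    (fun terms i => terms ++ [pvFString (PySem.Int.floordiv i n) (i+1)]) []

-- ===== PRECONDITION & SPEC =====
def Spec_generate_ids (n : Int) (out : List String) : Prop := out = generate_ids_alt n
instance (n : Int) (out : List String) : Decidable (Spec_generate_ids n out) := by unfold Spec_generate_ids; infer_instance

-- ===== CLAIM =====
def Claim_equal_generate_ids : Prop := ∀ (n : Int), Dom_generate_ids n → Spec_generate_ids n (generate_ids n)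

-- ===== LEMMAS AND PROOFS =====

lemma slice_pyRange_zero (c a m : Int) (ha : 0 ≤ a) (hm : 0 ≤ m) (h : a + m ≤ c) :
    PySem.List.slice (PySem.List.pyRange 0 c 1) (some a) (some (a+m)) =
      PySem.List.pyRange a (a+m) 1 := by
  rw [PySem.List.slice_toNat _ ha (by omega),
      PySem.List.pyRange_one_append 0 a c ha (by omega),
      PySem.List.pyRange_one_append a (a+m) c (by omega) h,
      List.drop_left' (by simp [PySem.List.length_pyRange_one]),
      List.take_left' (by simp [PySem.List.length_pyRange_one]; omega)]

lemma ids_slice (n L : Int) (hn : 0 < n) (hL : 0 ≤ L) (hL4 : L ≤ 3) :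
    PySem.List.slice ((PySem.List.pyRange 0 (4*n) 1).map (· + 1)) (some (L*n)) (some (L*n+n)) =
      (PySem.List.pyRange (L*n) (L*n+n) 1).map (· + 1) := by
  have ha : 0 ≤ L*n := mul_nonneg hL hn.le
  rw [PySem.List.slice_toNat _ ha (by nlinarith), ← List.map_drop, ← List.map_take,
      ← PySem.List.slice_toNat _ ha (by nlinarith),
      slice_pyRange_zero (4*n) (L*n) n ha hn.le (by nlinarith)]

lemma fd_eq (n i L : Int) (hn : 0 < n) (h1 : L*n ≤ i) (h2 : i < L*n + n) :
    PySem.Int.floordiv i n = L := by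
  rw [PySem.Int.floordiv_eq_iff_of_pos hn]
  exact ⟨h1, by nlinarith⟩

lemma A_eq (n : Int) (hn : 0 < n) : generate_ids n =
    (PySem.List.pyRange 0 n 1).map (fun i => pvFString 0 (i+1)) ++
    (PySem.List.pyRange n (2*n) 1).map (fun i => pvFString 1 (i+1)) ++
    (PySem.List.pyRange (2*n) (3*n) 1).map (fun i => pvFString 2 (i+1)) ++
    (PySem.List.pyRange (3*n) (4*n) 1).map (fun i => pvFString 3 (i+1)) := by
  have e4 : PySem.List.pyRange 0 4 1 = [0, 1, 2, 3] := by decide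
  unfold generate_ids
  simp only [e4, List.map_cons, List.map_nil, PySem.List.enumerate_cons,
    PySem.List.enumerate_nil, List.foldl_cons, List.foldl_nil,
    PySem.List.foldl_append_singleton_eq_map, List.nil_append]
  rw [ids_slice n 0 hn (by norm_num) (by norm_num), ids_slice n 1 hn (by norm_num) (by norm_num),
      ids_slice n 2 hn (by norm_num) (by norm_num), ids_slice n 3 hn (by norm_num) (by norm_num)]
  simp only [List.map_map]
  ring_nf
  simp only [Function.comp_def]

lemma B_eq (n : Int) (hn : 0 < n) : generate_ids_alt n =
    (PySem.List.pyRange 0 n 1).map (fun i => pvFString 0 (i+1)) ++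
    (PySem.List.pyRange n (2*n) 1).map (fun i => pvFString 1 (i+1)) ++
    (PySem.List.pyRange (2*n) (3*n) 1).map (fun i => pvFString 2 (i+1)) ++
    (PySem.List.pyRange (3*n) (4*n) 1).map (fun i => pvFString 3 (i+1)) := by
  have hsplit : PySem.List.pyRange 0 (4*n) 1 =
      PySem.List.pyRange 0 n 1 ++ PySem.List.pyRange n (2*n) 1 ++
      PySem.List.pyRange (2*n) (3*n) 1 ++ PySem.List.pyRange (3*n) (4*n) 1 := by
    rw [PySem.List.pyRange_one_append 0 (2*n) (4*n) (by omega) (by omega),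
        PySem.List.pyRange_one_append 0 n (2*n) (by omega) (by omega),
        PySem.List.pyRange_one_append (2*n) (3*n) (4*n) (by omega) (by omega)]
    simp [List.append_assoc]
  unfold generate_ids_alt
  rw [hsplit]
  simp only [List.foldl_append, PySem.List.foldl_append_singleton_eq_map, List.nil_append,
    List.append_assoc]
  congr 1
  · apply List.map_congr_left
    intro i hi
    rw [PySem.List.mem_pyRange_one] at hi
    rw [fd_eq n i 0 hn (by linarith [hi.1]) (by linarith [hi.2])]
  congr 1
  · apply List.map_congr_left
    intro i hi
    rw [PySem.List.mem_pyRange_one] at hi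
    rw [fd_eq n i 1 hn (by linarith [hi.1]) (by linarith [hi.2])]
  congr 1
  · apply List.map_congr_left
    intro i hi
    rw [PySem.List.mem_pyRange_one] at hi
    rw [fd_eq n i 2 hn (by linarith [hi.1]) (by linarith [hi.2])]
  · apply List.map_congr_left
    intro i hi
    rw [PySem.List.mem_pyRange_one] at hi
    rw [fd_eq n i 3 hn (by linarith [hi.1]) (by linarith [hi.2])]

-- ===== VERDICT =====
theorem generate_ids_spec : Claim_equal_generate_ids := by
  intro n _
  unfold Spec_generate_ids
  by_cases hn : 0 < n
  · rw [A_eq n hn, B_eq n hn]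
  · have hnil : PySem.List.pyRange 0 (4*n) 1 = [] :=
      PySem.List.pyRange_one_eq_nil (by omega)
    unfold generate_ids generate_ids_alt
    simp [hnil, PySem.List.slice, PySem.List.enumerate]
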